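-- pv_equiv track=rewrite | github.com/DavidCGordon/Product-Registers | tools/MersenneTools.py | cyc_sizes
-- ===== SOURCE A (Python) =====
-- from itertools import chain, combinations
--
-- def powerset(iterable):
--     s = list(iterable)
--     return chain.from_iterable(combinations(s, r) for r in range(len(s)+1))
--
-- def cyc_sizes(sizes):
-- 	cycs = [2**a-1 for a in sizes]
-- 	out = []
-- 	for combo in powerset(cycs):
-- 		prod = 1
-- 		for c in combo:
-- 			prod *= c
-- 		out.append(prod)
-- 	return out
-- ===== SOURCE B (Python) =====
-- def cyc_sizes(sizes):
--     cycs = [2 ** a - 1 for a in sizes]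
--     n = len(cycs)
--     out = [1]
--     layer = [(0, 1)]  # (next index eligible to extend the subset with, subset product)
--     for _ in range(n):
--         layer = [(j + 1, p * cycs[j]) for (start, p) in layer for j in range(start, n)]
--         out.extend(p for (_, p) in layer)
--     return out
-- ===== Notes on version B (the rewrite author's own statement) =====
-- stated objective: alternative
-- what changed: Replaces A's recomputation of each subset product from scratch (a fresh inner loop over every combination from itertools) by a layered DP that keeps (next-index, product) pairs per subset size and extends each already-built subset product by one later element.
-- outside the precondition, e.g. on cyc_sizes([-1]): A returns [1, -0.5], B returns [1, -0.5]
import Mathlib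
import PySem

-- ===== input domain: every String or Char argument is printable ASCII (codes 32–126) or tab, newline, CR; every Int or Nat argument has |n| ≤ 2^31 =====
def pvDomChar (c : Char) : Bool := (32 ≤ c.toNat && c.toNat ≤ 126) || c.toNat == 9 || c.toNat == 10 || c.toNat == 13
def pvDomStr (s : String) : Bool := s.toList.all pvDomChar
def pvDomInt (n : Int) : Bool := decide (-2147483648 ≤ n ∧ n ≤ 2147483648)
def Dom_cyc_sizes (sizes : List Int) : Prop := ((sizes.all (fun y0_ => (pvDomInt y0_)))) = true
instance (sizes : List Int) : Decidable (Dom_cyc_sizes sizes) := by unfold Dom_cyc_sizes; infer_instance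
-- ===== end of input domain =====

-- B replaces A's per-subset inner product loop over each itertools combination by a layered DP
-- that extends each already-built subset product by one later element; return value only.

-- ===== PORT A =====
def cyc_sizes (sizes : List Int) : List Int :=
  let cycs := sizes.map (fun a => 2 ^ a.toNat - 1)
  ((List.range (cycs.length + 1)).flatMap (fun r => PySem.List.combinations cycs r)).foldl
    (fun out combo => out ++ [combo.foldl (fun prod c => prod * c) 1]) []

-- ===== PORT B =====
def cyc_sizes_alt (sizes : List Int) : List Int :=
  let cycs := sizes.map (fun a => 2 ^ a.toNat - 1)
  let n := cycs.length
  ((List.range n).foldl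
    (fun st _ =>
      let layer := st.2.flatMap (fun sp =>
        (List.range' sp.1 (n - sp.1)).map (fun j => (j + 1, sp.2 * cycs.getD j 0)))
      (st.1 ++ layer.map Prod.snd, layer))
    ([1], [(0, 1)])).1

-- ===== PRECONDITION & SPEC =====
-- Pre_ excludes lists containing a negative entry: there Python's 2**a is a float, so A returns a
-- list containing floats, not a value of the declared type List Int.
def Pre_cyc_sizes (sizes : List Int) : Prop := ∀ a ∈ sizes, 0 ≤ a
instance (sizes : List Int) : Decidable (Pre_cyc_sizes sizes) := by unfold Pre_cyc_sizes; infer_instance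
def pvWitness_cyc_sizes : List Int := [2, 3]

def Spec_cyc_sizes (sizes : List Int) (out : List Int) : Prop := out = cyc_sizes_alt sizes
instance (sizes : List Int) (out : List Int) : Decidable (Spec_cyc_sizes sizes out) := by unfold Spec_cyc_sizes; infer_instance

-- ===== CLAIM (what is proved, stated in full; the proofs are below) =====
def Claim_equal_cyc_sizes : Prop := ∀ (sizes : List Int), Dom_cyc_sizes sizes → Pre_cyc_sizes sizes → Spec_cyc_sizes sizes (cyc_sizes sizes)

-- ===== LEMMAS AND PROOFS =====

-- one DP extension step of B's loop
def pvStep (xs : List Int) (l : List (Nat × Int)) : List (Nat × Int) :=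
  l.flatMap (fun sp =>
    (List.range' sp.1 (xs.length - sp.1)).map (fun j => (j + 1, sp.2 * xs.getD j 0)))

theorem pvStep_nil (xs : List Int) : pvStep xs [] = [] := rfl

theorem pvStep_append (xs : List Int) (l1 l2 : List (Nat × Int)) :
    pvStep xs (l1 ++ l2) = pvStep xs l1 ++ pvStep xs l2 := by
  simp [pvStep]

theorem pvStepN_nil (xs : List Int) (r : Nat) : (pvStep xs)^[r] [] = [] := by
  induction r with
  | zero => rfl
  | succ r ih => rw [Function.iterate_succ_apply, pvStep_nil, ih]

theorem pvStepN_append (xs : List Int) (r : Nat) (l1 l2 : List (Nat × Int)) :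
    (pvStep xs)^[r] (l1 ++ l2) = (pvStep xs)^[r] l1 ++ (pvStep xs)^[r] l2 := by
  induction r generalizing l1 l2 with
  | zero => rfl
  | succ r ih => rw [Function.iterate_succ_apply, pvStep_append, ih,
      Function.iterate_succ_apply, Function.iterate_succ_apply]

-- products of the size-r subsets of the indices ≥ s, in CPython's combination order
theorem pvKey (xs : List Int) : ∀ (r s : Nat) (p : Int), s ≤ xs.length →
    ((pvStep xs)^[r] [(s, p)]).map Prod.snd
      = (PySem.List.combinations (xs.drop s) r).map (fun c => c.foldl (fun q v => q * v) p) := by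
  intro r
  induction r with
  | zero =>
    intro s p hs
    simp [PySem.List.combinations_zero]
  | succ r ih =>
    have main : ∀ (k s : Nat) (p : Int), xs.length - s = k → s ≤ xs.length →
        ((pvStep xs)^[r + 1] [(s, p)]).map Prod.snd
          = (PySem.List.combinations (xs.drop s) (r + 1)).map
              (fun c => c.foldl (fun q v => q * v) p) := by
      intro k
      induction k with
      | zero =>
        intro s p hk hs
        have hsn : s = xs.length := by omega
        subst hsn
        rw [Function.iterate_succ_apply]
        have h1 : pvStep xs [(xs.length, p)] = [] := by simp [pvStep]
        rw [h1, pvStepN_nil]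
        simp [PySem.List.combinations_nil_succ]
      | succ k ihk =>
        intro s p hk hs
        have hlt : s < xs.length := by omega
        have hdrop : xs.drop s = xs.getD s 0 :: xs.drop (s + 1) := by
          rw [List.drop_eq_getElem_cons hlt, List.getD_eq_getElem xs 0 hlt]
        have hrange : List.range' s (xs.length - s)
            = s :: List.range' (s + 1) (xs.length - (s + 1)) := by
          have h2 : xs.length - s = (xs.length - (s + 1)) + 1 := by omega
          rw [h2, List.range'_succ]
        have hstep : pvStep xs [(s, p)]
            = [(s + 1, p * xs.getD s 0)] ++ pvStep xs [(s + 1, p)] := by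
          simp [pvStep, hrange]
        rw [Function.iterate_succ_apply, hstep, pvStepN_append, List.map_append,
          ih (s + 1) (p * xs.getD s 0) (by omega),
          ← Function.iterate_succ_apply, ihk (s + 1) p (by omega) (by omega),
          hdrop, PySem.List.combinations_cons_succ, List.map_append, List.map_map]
        rfl
    intro s p hs
    exact main (xs.length - s) s p rfl hs

-- B's accumulating loop, characterised
theorem pvLoopB (xs : List Int) : ∀ (m : Nat) (out : List Int) (l : List (Nat × Int)),
    (List.range m).foldl
      (fun st _ =>
        let layer := pvStep xs st.2
        (st.1 ++ layer.map Prod.snd, layer)) (out, l)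
      = (out ++ (List.range m).flatMap (fun i => ((pvStep xs)^[i + 1] l).map Prod.snd),
         (pvStep xs)^[m] l) := by
  intro m
  induction m with
  | zero => intro out l; simp
  | succ m ih =>
    intro out l
    rw [List.range_succ, List.foldl_append, ih]
    simp only [List.foldl_cons, List.foldl_nil, List.flatMap_append, List.flatMap_cons,
      List.flatMap_nil, List.append_nil, ← List.append_assoc]
    rw [← Function.iterate_succ_apply' (pvStep xs) m l]

-- ===== VERDICT (by name: the statement is the Claim_ definition above) =====
theorem cyc_sizes_spec : Claim_equal_cyc_sizes := by
  intro sizes _ _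
  unfold Spec_cyc_sizes cyc_sizes cyc_sizes_alt
  set cycs := sizes.map (fun a => (2:Int) ^ a.toNat - 1) with hcycs
  simp only []
  have hB : (fun (st : List Int × List (Nat × Int)) (_ : Nat) =>
      let layer := st.2.flatMap (fun sp =>
        (List.range' sp.1 (cycs.length - sp.1)).map (fun j => (j + 1, sp.2 * cycs.getD j 0)))
      (st.1 ++ layer.map Prod.snd, layer))
      = (fun (st : List Int × List (Nat × Int)) (_ : Nat) =>
          let layer := pvStep cycs st.2
          (st.1 ++ layer.map Prod.snd, layer)) := rfl
  rw [hB, pvLoopB cycs cycs.length [1] [(0, 1)]]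
  rw [PySem.List.foldl_append_singleton_eq_map]
  rw [List.range_succ_eq_map]
  simp only [List.flatMap_cons, PySem.List.combinations_zero, List.map_cons,
    List.foldl_nil, List.flatMap_map, List.nil_append, List.singleton_append]
  rw [List.map_flatMap]
  congr 1
  congr 1
  funext i
  have h := pvKey cycs (i + 1) 0 1 (Nat.zero_le _)
  simpa using h.symm
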